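-- pv_equiv track=rewrite | github.com/eylon696/Machine-learning | lab 7/lab_7_0_SVM.py | classify_lb2
-- ===== SOURCE A (Python) =====
-- def classify_lb2(v, label):
--     counter = 0
--     res1_lis = []
--     res2_lis_names = []
--     count = 0
--     dictionaryArr = dict()
--     for key in label:
--         if not (key in dictionaryArr):
--             dictionaryArr[key] = dictionaryArr.get(key, count)
--             res1_lis.append([])
--             res2_lis_names.append(key)
--             count += 1
--         res1_lis[res2_lis_names.index(key)].append(v[counter])
--         counter += 1
--     return res1_lis[0], res1_lis[1]
-- ===== SOURCE B (Python) =====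
-- def classify_lb2(v, label):
--     distinct = list(dict.fromkeys(label))
--     groups = [[v[i] for i in range(len(label)) if label[i] == lab] for lab in distinct]
--     return groups[0], groups[1]
-- ===== Notes on version B (the rewrite author's own statement) =====
-- stated objective: simpler
-- what changed: A's single accumulating pass with parallel counter/count/dict/name-index bookkeeping is replaced by computing the first-appearance-ordered distinct labels once (dict.fromkeys) and then building each group by an independent index scan over label.
import Mathlib
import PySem

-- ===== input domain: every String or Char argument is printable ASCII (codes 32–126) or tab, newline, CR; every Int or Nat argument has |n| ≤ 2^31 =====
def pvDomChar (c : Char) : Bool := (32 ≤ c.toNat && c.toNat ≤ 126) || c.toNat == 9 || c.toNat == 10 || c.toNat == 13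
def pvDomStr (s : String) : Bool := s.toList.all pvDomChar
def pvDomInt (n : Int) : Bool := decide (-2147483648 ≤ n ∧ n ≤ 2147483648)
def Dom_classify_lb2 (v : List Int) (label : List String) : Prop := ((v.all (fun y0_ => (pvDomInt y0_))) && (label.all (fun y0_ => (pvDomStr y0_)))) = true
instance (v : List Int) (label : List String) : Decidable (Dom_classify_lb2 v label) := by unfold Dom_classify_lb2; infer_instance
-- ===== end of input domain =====

-- B replaces A's single accumulating pass (counter/count/dict/name-index bookkeeping) by
-- "ordered distinct labels once, then one independent index scan per label" — objective: simpler.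

-- ===== PORT A =====
-- the for-loop of A; state: counter, res1_lis, res2_lis_names, count, dictionaryArr
-- v[counter] / res2_lis_names.index(key) are total here via getD: Pre_ makes v[counter]
-- in range, and key is always a member of res2_lis_names when .index is evaluated.
def classifyA_loop (v : List Int) (counter : Int) (res1 : List (List Int))
    (names : List String) (count : Int) (d : PySem.Dict String Int) :
    List String → List (List Int)
  | [] => res1
  | key :: rest =>
    let st :=
      if d.contains key then (res1, names, count, d)
      else (res1 ++ [([] : List Int)], names ++ [key], count + 1, d.insert key (d.getD key count))
    match st with
    | (res1', names', count', d') =>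
      classifyA_loop v (counter + 1)
        (res1'.modify ((PySem.List.index? names' key).getD 0)
          (fun g => g ++ [PySem.List.pyGetD v counter 0]))
        names' count' d' rest

def classify_lb2 (v : List Int) (label : List String) : List Int × List Int :=
  let res1 := classifyA_loop v 0 [] [] 0 PySem.Dict.empty label
  (PySem.List.pyGetD res1 0 [], PySem.List.pyGetD res1 1 [])

-- ===== PORT B =====
-- [v[i] for i in range(len(label)) if label[i] == lab]
def grpB (v : List Int) (label : List String) (lab : String) : List Int :=
  ((PySem.List.pyRange 0 label.length 1).filter
      (fun i => PySem.List.pyGetD label i "" == lab)).map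
    (fun i => PySem.List.pyGetD v i 0)

def classify_lb2_alt (v : List Int) (label : List String) : List Int × List Int :=
  let distinct := PySem.List.dedup label       -- list(dict.fromkeys(label))
  let groups := distinct.map (grpB v label)
  (PySem.List.pyGetD groups 0 [], PySem.List.pyGetD groups 1 [])

-- ===== PRECONDITION & SPEC =====
-- exactly where A returns: v must cover every label index (else v[counter] raises
-- IndexError) and at least two distinct labels must occur (else res1_lis[1] raises).
def Pre_classify_lb2 (v : List Int) (label : List String) : Prop :=
  label.length ≤ v.length ∧ 2 ≤ (PySem.List.dedup label).length
instance (v : List Int) (label : List String) : Decidable (Pre_classify_lb2 v label) := by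
  unfold Pre_classify_lb2; infer_instance

def pvWitness_classify_lb2 : List Int × List String := ([1, 2, 3], ["a", "b", "a"])

def Spec_classify_lb2 (v : List Int) (label : List String) (out : List Int × List Int) : Prop := out = classify_lb2_alt v label
instance (v : List Int) (label : List String) (out : List Int × List Int) : Decidable (Spec_classify_lb2 v label out) := by unfold Spec_classify_lb2; infer_instance

-- ===== CLAIM (what is proved, stated in full; the proofs are below) =====
def Claim_equal_classify_lb2 : Prop := ∀ (v : List Int) (label : List String), Dom_classify_lb2 v label → Pre_classify_lb2 v label → Spec_classify_lb2 v label (classify_lb2 v label)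

-- ===== LEMMAS AND PROOFS =====

-- group of lab among the first n positions of label (plain getD form of grpB)
def G (v : List Int) (label : List String) (n : Nat) (lab : String) : List Int :=
  ((List.range n).filter (fun i => label.getD i "" == lab)).map (fun i => v.getD i 0)

lemma grpB_eq (v : List Int) (label : List String) (lab : String) :
    grpB v label lab = G v label label.length lab := by
  unfold grpB G
  rw [PySem.List.pyRange_one]
  simp [List.filter_map, List.map_map, Function.comp_def]

lemma G_succ (v : List Int) (label : List String) (n : Nat) (lab : String) :
    G v label (n + 1) lab
      = G v label n lab ++ (if label.getD n "" = lab then [v.getD n 0] else []) := by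
  unfold G
  rw [List.range_succ, List.filter_append, List.map_append]
  by_cases h : label.getD n "" = lab
  all_goals rw [List.getD_eq_getElem?_getD] at h
  all_goals simp [h]

lemma map_modify_idx (names : List String) (f : String → List Int) (key : String)
    (x : Int) (hnd : names.Nodup) (hmem : key ∈ names) :
    (names.map f).modify ((PySem.List.index? names key).getD 0) (fun g => g ++ [x])
      = names.map (fun lab => f lab ++ (if lab = key then [x] else [])) := by
  induction names with
  | nil => cases hmem
  | cons a t ih =>
    rcases List.nodup_cons.mp hnd with ⟨hna, hndt⟩
    by_cases hk : a = key
    · rw [hk] at hna ⊢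
      rw [PySem.List.index?_cons_self]
      simp only [Option.getD_some, List.map_cons]
      have hmod : ((f key :: t.map f).modify 0 fun g => g ++ [x])
          = (f key ++ [x]) :: t.map f := by simp [List.modify]
      rw [hmod]
      have htail : t.map f = t.map (fun lab => f lab ++ if lab = key then [x] else []) :=
        List.map_congr_left (fun b hb => by
          have : b ≠ key := fun e => hna (e ▸ hb)
          simp [this])
      rw [← htail]
      simp
    · have hmem' : key ∈ t := by
        cases hmem with
        | head => exact absurd rfl hk
        | tail _ h' => exact h'
      rw [PySem.List.index?_cons_of_ne t hk]
      obtain ⟨j, hj⟩ := Option.isSome_iff_exists.mp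
        ((PySem.List.index?_isSome_iff t key).mpr hmem')
      rw [hj]
      simp only [Option.map_some, Option.getD_some, List.map_cons]
      have hmod : ((f a :: t.map f).modify (j + 1) fun g => g ++ [x])
          = f a :: ((t.map f).modify j fun g => g ++ [x]) := by
        simp [List.modify]
      rw [hmod]
      have := ih hndt hmem'
      rw [hj] at this
      simp only [Option.getD_some] at this
      simp [this, hk]

lemma dedup_append_singleton_mem {key : String} {p : List String} (h : key ∈ p) :
    PySem.List.dedup (p ++ [key]) = PySem.List.dedup p := by
  simp only [PySem.List.dedup_eq_ofList, PySem.Set.ofList_eq_foldl, List.foldl_append,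
    List.foldl_cons, List.foldl_nil]
  have : PySem.Set.contains (PySem.Set.ofList p) key = true := by
    rw [PySem.Set.contains_iff, PySem.Set.mem_ofList]; exact h
  simp [PySem.Set.add, PySem.Set.ofList_eq_foldl] at this ⊢
  simp [this]

lemma dedup_append_singleton_not_mem {key : String} {p : List String} (h : key ∉ p) :
    PySem.List.dedup (p ++ [key]) = PySem.List.dedup p ++ [key] := by
  simp only [PySem.List.dedup_eq_ofList, PySem.Set.ofList_eq_foldl, List.foldl_append,
    List.foldl_cons, List.foldl_nil]
  have : PySem.Set.contains (PySem.Set.ofList p) key = false := by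
    rw [← Bool.not_eq_true, PySem.Set.contains_iff, PySem.Set.mem_ofList]
    · exact h
  simp [PySem.Set.add, PySem.Set.ofList_eq_foldl] at this ⊢
  simp [this]

-- G on a fresh key over the prefix is empty
lemma G_not_mem (v : List Int) (p rest : List String) (key : String) (h : key ∉ p) :
    G v (p ++ rest) p.length key = [] := by
  unfold G
  rw [List.map_eq_nil_iff, List.filter_eq_nil_iff]
  intro i hi
  rw [List.mem_range] at hi
  rw [List.getD_append _ _ _ _ hi, List.getD_eq_getElem _ _ hi]
  simp only [beq_iff_eq]
  intro he
  exact h (he ▸ List.getElem_mem hi)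

lemma getD_boundary (p rest : List String) (key : String) :
    (p ++ key :: rest).getD p.length "" = key := by
  rw [List.getD_eq_getElem?_getD, List.getElem?_append_right (le_refl p.length)]
  simp

-- the loop invariant
lemma loop_eq (v : List Int) (label : List String) :
    ∀ (rest p : List String), label = p ++ rest →
    ∀ (count : Int) (d : PySem.Dict String Int),
    (∀ k, d.contains k = true ↔ k ∈ p) →
    classifyA_loop v (p.length : Int)
        ((PySem.List.dedup p).map (G v label p.length))
        (PySem.List.dedup p) count d rest
      = (PySem.List.dedup label).map (G v label label.length) := by
  intro rest
  induction rest with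
  | nil =>
    intro p hp count d hd
    simp at hp
    subst hp
    simp [classifyA_loop]
  | cons key rest ih =>
    intro p hp count d hd
    have hxcast : PySem.List.pyGetD v (p.length : Int) 0 = v.getD p.length 0 :=
      PySem.List.pyGetD_natCast v p.length 0
    have hbnd : label.getD p.length "" = key := hp ▸ getD_boundary p rest key
    by_cases hmem : key ∈ p
    · -- key already registered
      have hc : d.contains key = true := (hd key).mpr hmem
      have hkeyd : key ∈ PySem.List.dedup p := (PySem.List.mem_dedup _ _).mpr hmem
      rw [classifyA_loop, if_pos hc]
      dsimp only
      rw [hxcast, map_modify_idx _ _ _ _ (PySem.List.nodup_dedup p) hkeyd]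
      have hmapeq :
          (PySem.List.dedup p).map
              (fun lab => G v label p.length lab ++ (if lab = key then [v.getD p.length 0] else []))
            = (PySem.List.dedup p).map (G v label (p.length + 1)) := by
        apply List.map_congr_left
        intro lab _
        rw [G_succ, hbnd]
        by_cases h : lab = key
        · simp [h]
        · have h' : key ≠ lab := fun e => h e.symm
          simp [h, h']
      rw [hmapeq]
      have hdedup : PySem.List.dedup (p ++ [key]) = PySem.List.dedup p :=
        dedup_append_singleton_mem hmem
      have := ih (p ++ [key]) (by simpa using hp) count d
        (fun k => by
          rw [hd k]
          simp only [List.mem_append, List.mem_singleton]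
          constructor
          · exact Or.inl
          · rintro (h | rfl)
            · exact h
            · exact hmem)
      rw [hdedup] at this
      simpa using this
    · -- fresh key
      have hc : d.contains key = false := by
        rw [← Bool.not_eq_true]; exact fun h => hmem ((hd key).mp h)
      rw [classifyA_loop, if_neg (by rw [hc]; exact Bool.false_ne_true)]
      dsimp only
      have hdedup : PySem.List.dedup (p ++ [key]) = PySem.List.dedup p ++ [key] :=
        dedup_append_singleton_not_mem hmem
      have hres :
          (PySem.List.dedup p).map (G v label p.length) ++ [([] : List Int)]
            = (PySem.List.dedup p ++ [key]).map (G v label p.length) := by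
        rw [List.map_append]
        simp [hp ▸ G_not_mem v p (key :: rest) key hmem]
      rw [hxcast, hres]
      have hnodup' : (PySem.List.dedup p ++ [key]).Nodup := by
        rw [← hdedup]; exact PySem.List.nodup_dedup _
      have hkeyd : key ∈ PySem.List.dedup p ++ [key] := by simp
      rw [map_modify_idx _ _ _ _ hnodup' hkeyd]
      have hmapeq :
          (PySem.List.dedup p ++ [key]).map
              (fun lab => G v label p.length lab ++ (if lab = key then [v.getD p.length 0] else []))
            = (PySem.List.dedup p ++ [key]).map (G v label (p.length + 1)) := by
        apply List.map_congr_left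
        intro lab _
        rw [G_succ, hbnd]
        by_cases h : lab = key
        · simp [h]
        · have h' : key ≠ lab := fun e => h e.symm
          simp [h, h']
      rw [hmapeq, ← hdedup]
      have := ih (p ++ [key]) (by simpa using hp) (count + 1)
        (d.insert key (d.getD key count))
        (fun k => by
          rw [PySem.Dict.contains_insert]
          simp only [Bool.or_eq_true, beq_iff_eq, hd k, List.mem_append, List.mem_singleton]
          tauto)
      simpa using this

theorem classify_lb2_spec : Claim_equal_classify_lb2 := by
  unfold Claim_equal_classify_lb2
  intro v label _ _
  unfold Spec_classify_lb2 classify_lb2 classify_lb2_alt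
  have h0 : classifyA_loop v 0 [] [] 0 PySem.Dict.empty label
      = (PySem.List.dedup label).map (G v label label.length) := by
    have := loop_eq v label label [] rfl 0 PySem.Dict.empty (fun k => by simp)
    simpa using this
  rw [h0]
  have : (PySem.List.dedup label).map (grpB v label)
      = (PySem.List.dedup label).map (G v label label.length) :=
    List.map_congr_left (fun lab _ => grpB_eq v label lab)
  simp only [this]
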